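-- pv_equiv track=rewrite | github.com/pokerdio/generic | cf/cf-339e.py | go
-- ===== SOURCE A (Python) =====
-- from builtins import sum
--
-- def cure(v):
--     ret = [v[0]]
--     for c in v[1:]:
--         if abs(ret[-1][1] - c[0]) == 1:
--             ret[-1] = (ret[-1][0], c[1])
--         else:
--             ret.append(c)
--     return ret
--
-- def pairs(n):
--     for i in range(n):
--         for j in range(i + 1, n + 1):
--             yield i, j
--
-- def twist(v, start, stop):
--     v = v.copy()
--     v[start:stop] = reversed([tuple(reversed(p)) for p in v[start:stop]])
--     return v
--
-- def go(v):
--     best = 999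
--     besta, bestb = 0, 0
--     bestv = None
--     ret = []
--     for start, stop in pairs(len(v)):
--         a = 1 + sum(abs(p[1] - p[0]) + 1 for p in v[:start])
--         b = a + sum(abs(p[1] - p[0]) + 1 for p in v[start:stop]) - 1
--         v2 = cure(twist(v, start, stop))
--         score = len(v2)
--
--         ret.append((score, v2, a, b))
--     for score, v, a, b in sorted(ret):
--         yield v, a, b
-- ===== SOURCE B (Python) =====
-- def go(v):
--     n = len(v)
--     # break table of v: brk[k-1] iff there is a merge-break between v[k-1] and v[k]
--     brk = [abs(v[k - 1][1] - v[k][0]) != 1 for k in range(1, n)]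
--     # prefix weights: P[k] = sum of abs(y-x)+1 over v[:k]
--     P = [0]
--     for x, y in v:
--         P.append(P[-1] + abs(y - x) + 1)
--
--     # components of twist(v,i,j)[k], read off v without building the twisted list
--     def first(i, j, k):
--         return v[i + j - 1 - k][1] if i <= k < j else v[k][0]
--
--     def second(i, j, k):
--         return v[i + j - 1 - k][0] if i <= k < j else v[k][1]
--
--     # break position of twist(v,i,j) at k: reversing-with-swapping preserves every
--     # interior adjacency (reflected through i+j), so only the seams i and j are re-checked
--     def cut(i, j, k):
--         if k == i or k == j:
--             return abs(second(i, j, k - 1) - first(i, j, k)) != 1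
--         if i < k < j:
--             return brk[i + j - k - 1]
--         return brk[k - 1]
--
--     ret = []
--     for i in range(n):
--         for j in range(i + 1, n + 1):
--             bounds = [0] + [k for k in range(1, n) if cut(i, j, k)] + [n]
--             c = [(first(i, j, a), second(i, j, b - 1)) for a, b in zip(bounds, bounds[1:])]
--             ret.append((len(c), c, 1 + P[i], P[j]))
--     for score, c, a, b in sorted(ret):
--         yield c, a, b
-- ===== Notes on version B (the rewrite author's own statement) =====
-- stated objective: alternative
-- what changed: B never builds the twisted list and never runs A's accumulator merge scan: it precomputes v's break-position table and a prefix-sum table once, and for each pair (i,j) derives the cured result directly by reflecting interior break indices through the reversed segment (reversal with pair-swapping preserves interior adjacencies), re-checking only the two seam adjacencies, then emitting one output pair per run from the break bounds.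
import Mathlib
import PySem

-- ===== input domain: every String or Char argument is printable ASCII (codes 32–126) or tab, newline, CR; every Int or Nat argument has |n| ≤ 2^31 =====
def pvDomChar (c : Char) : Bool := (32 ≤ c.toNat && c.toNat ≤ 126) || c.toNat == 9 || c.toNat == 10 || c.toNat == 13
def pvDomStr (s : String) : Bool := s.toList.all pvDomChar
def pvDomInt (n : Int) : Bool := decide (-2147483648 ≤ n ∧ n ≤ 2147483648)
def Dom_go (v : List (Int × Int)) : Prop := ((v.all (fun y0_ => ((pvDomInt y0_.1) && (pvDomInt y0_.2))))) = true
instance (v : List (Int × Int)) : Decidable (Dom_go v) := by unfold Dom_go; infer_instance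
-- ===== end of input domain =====

-- B never builds or rescans the twisted list: it precomputes v's break positions and per pair
-- derives the cured runs by reflecting interior break indices through the reversed segment,
-- re-checking only the two seams (objective: alternative; return-value equivalence — A is a generator).

-- ===== PORT A =====
-- Python's sorted() on these 4-tuples, ported by hand (exact: Python compares tuples and
-- lists lexicographically; Lean's < on products is pointwise, so the comparison is spelled
-- out and fed to PySem's stable insertion sort).  Shared by both ports (both call sorted).
def pairLt (a b : Int × Int) : Bool :=
  a.1 < b.1 || (a.1 == b.1 && a.2 < b.2)

def listLt : List (Int × Int) → List (Int × Int) → Bool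
  | [], [] => false
  | [], _ :: _ => true
  | _ :: _, [] => false
  | a :: as, b :: bs => if a = b then listLt as bs else pairLt a b

def tupLt (x y : Int × List (Int × Int) × Int × Int) : Bool :=
  if x.1 = y.1 then
    (if x.2.1 = y.2.1 then
      (if x.2.2.1 = y.2.2.1 then x.2.2.2 < y.2.2.2 else x.2.2.1 < y.2.2.1)
     else listLt x.2.1 y.2.1)
  else x.1 < y.1

def pySortEntries (l : List (Int × List (Int × Int) × Int × Int)) :
    List (Int × List (Int × Int) × Int × Int) :=
  l.foldl (fun acc x => PySem.List.insertBy tupLt x acc) []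

-- step of A's cure loop (ret[-1] lookup / rewrite; the 'none' branch is unreachable,
-- ret is never empty)
def cureStep (ret : List (Int × Int)) (c : Int × Int) : List (Int × Int) :=
  match ret.getLast? with
  | some l => if |l.2 - c.1| = 1 then ret.dropLast ++ [(l.1, c.2)] else ret ++ [c]
  | none => ret ++ [c]

-- cure([]) would raise IndexError in Python; go never calls it on []
def cureA (v : List (Int × Int)) : List (Int × Int) :=
  match v with
  | [] => []
  | h :: t => t.foldl cureStep [h]

-- slice assignment v[start:stop] = … ported as prefix ++ new segment ++ suffix (exact for
-- the clamped slice semantics, and 0 ≤ start ≤ stop ≤ len here)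
def twistA (v : List (Int × Int)) (start stop : Int) : List (Int × Int) :=
  PySem.List.slice v none (some start)
    ++ ((PySem.List.slice v (some start) (some stop)).map (fun p => (p.2, p.1))).reverse
    ++ PySem.List.slice v (some stop) none

def go (v : List (Int × Int)) : List ((List (Int × Int)) × Int × Int) :=
  let n : Int := v.length
  let ret := (PySem.List.pyRange 0 n 1).foldl (fun ret i =>
    (PySem.List.pyRange (i + 1) (n + 1) 1).foldl (fun ret j =>
      let a := 1 + ((PySem.List.slice v none (some i)).map (fun p => |p.2 - p.1| + 1)).sum
      let b := a + ((PySem.List.slice v (some i) (some j)).map (fun p => |p.2 - p.1| + 1)).sum - 1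
      let v2 := cureA (twistA v i j)
      ret ++ [((v2.length : Int), v2, a, b)]) ret) []
  (pySortEntries ret).map (fun e => (e.2.1, e.2.2.1, e.2.2.2))

-- ===== PORT B =====
-- B's break table of v: entry k-1 says whether v[k-1] and v[k] do NOT merge
-- (indexing is always in range in Source B; pyGetD with an unused default is exact there)
def brkTab (v : List (Int × Int)) : List Bool :=
  (PySem.List.pyRange 1 (v.length : Int) 1).map
    (fun k => decide (¬ |(PySem.List.pyGetD v (k - 1) (0, 0)).2 - (PySem.List.pyGetD v k (0, 0)).1| = 1))

-- first / second component of twist(v,i,j)[k], read off v without building the twisted list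
def firstB (v : List (Int × Int)) (i j k : Int) : Int :=
  if i ≤ k ∧ k < j then (PySem.List.pyGetD v (i + j - 1 - k) (0, 0)).2
  else (PySem.List.pyGetD v k (0, 0)).1

def secondB (v : List (Int × Int)) (i j k : Int) : Int :=
  if i ≤ k ∧ k < j then (PySem.List.pyGetD v (i + j - 1 - k) (0, 0)).1
  else (PySem.List.pyGetD v k (0, 0)).2

-- break of twist(v,i,j) at k: interior breaks are v's breaks reflected through i+j,
-- only the seams k = i and k = j are re-checked
def cutB (v : List (Int × Int)) (brk : List Bool) (i j k : Int) : Bool :=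
  if k = i ∨ k = j then decide (¬ |secondB v i j (k - 1) - firstB v i j k| = 1)
  else if i < k ∧ k < j then PySem.List.pyGetD brk (i + j - k - 1) false
  else PySem.List.pyGetD brk (k - 1) false

-- B's prefix table: P[k] = sum of |p.2 - p.1| + 1 over v[:k]
def prefixTab (v : List (Int × Int)) : List Int :=
  v.foldl (fun P p => P ++ [PySem.List.pyGetD P (-1) 0 + (|p.2 - p.1| + 1)]) [0]

def go_alt (v : List (Int × Int)) : List ((List (Int × Int)) × Int × Int) :=
  let n : Int := v.length
  let brk := brkTab v
  let P := prefixTab v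
  let ret := (PySem.List.pyRange 0 n 1).foldl (fun ret i =>
    (PySem.List.pyRange (i + 1) (n + 1) 1).foldl (fun ret j =>
      let bounds : List Int := 0 :: (PySem.List.pyRange 1 n 1).filter (cutB v brk i j) ++ [n]
      let c := (bounds.zip bounds.tail).map (fun ab => (firstB v i j ab.1, secondB v i j (ab.2 - 1)))
      ret ++ [((c.length : Int), c, 1 + PySem.List.pyGetD P i 0, PySem.List.pyGetD P j 0)]) ret) []
  (pySortEntries ret).map (fun e => (e.2.1, e.2.2.1, e.2.2.2))

-- ===== PRECONDITION & SPEC =====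
def Spec_go (v : List (Int × Int)) (out : List ((List (Int × Int)) × Int × Int)) : Prop := out = go_alt v
instance (v : List (Int × Int)) (out : List ((List (Int × Int)) × Int × Int)) : Decidable (Spec_go v out) := by unfold Spec_go; infer_instance

-- ===== CLAIM (what is proved, stated in full; the proofs are below) =====
def Claim_equal_go : Prop := ∀ (v : List (Int × Int)), Dom_go v → Spec_go v (go v)

-- ===== LEMMAS AND PROOFS =====
def sumW (l : List (Int × Int)) : Int := (l.map (fun p => |p.2 - p.1| + 1)).sum

theorem foldl_congr' {α β : Type} (xs : List α) {f g : β → α → β}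
    (h : ∀ acc x, x ∈ xs → f acc x = g acc x) :
    ∀ init, xs.foldl f init = xs.foldl g init := by
  induction xs with
  | nil => intro init; rfl
  | cons x xs ih =>
    intro init
    simp only [List.foldl_cons]
    rw [h init x (by simp)]
    exact ih (fun acc y hy => h acc y (by simp [hy])) _

-- proof-side list-recursion view of A's cure
mutual
  def cureL : List (Int × Int) → List (Int × Int)
    | [] => []
    | (s, e) :: rest => mergeRun s e rest
  termination_by l => 2 * l.length
  decreasing_by all_goals (simp; try omega)
  def mergeRun (s e : Int) : List (Int × Int) → List (Int × Int)
    | [] => [(s, e)]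
    | c :: rest => if |e - c.1| = 1 then mergeRun s c.2 rest else (s, e) :: cureL (c :: rest)
  termination_by l => 2 * l.length + 1
  decreasing_by all_goals (simp; try omega)
end

-- proof-side index-scan view of cure
mutual
  def cureOut (v : List (Int × Int)) (k : Nat) : List (Int × Int) :=
    if k < v.length then
      let p := v.getD k (0, 0)
      cureIn v p.1 p.2 (k + 1)
    else []
  termination_by 2 * (v.length - k)
  decreasing_by omega
  def cureIn (v : List (Int × Int)) (s e : Int) (k : Nat) : List (Int × Int) :=
    if k < v.length then
      if |e - (v.getD k (0, 0)).1| = 1 then cureIn v s (v.getD k (0, 0)).2 (k + 1)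
      else (s, e) :: cureOut v k
    else [(s, e)]
  termination_by 2 * (v.length - k) + 1
  decreasing_by all_goals omega
end

theorem cure_both : ∀ (m : Nat) (v : List (Int × Int)) (k : Nat), v.length - k ≤ m →
    (cureOut v k = cureL (v.drop k)) ∧ ∀ s e, cureIn v s e k = mergeRun s e (v.drop k) := by
  intro m
  induction m with
  | zero =>
    intro v k h
    have hk : v.length ≤ k := by omega
    have hd : v.drop k = [] := List.drop_eq_nil_of_le hk
    constructor
    · rw [cureOut.eq_def, if_neg (by omega), hd]; rw [cureL]
    · intro s e; rw [cureIn.eq_def, if_neg (by omega), hd, mergeRun]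
  | succ m ih =>
    intro v k h
    by_cases hk : k < v.length
    · have hd : v.drop k = v[k] :: v.drop (k + 1) := List.drop_eq_getElem_cons hk
      have hget : v.getD k (0, 0) = v[k] := List.getD_eq_getElem v (0, 0) hk
      have hOut : cureOut v k = cureL (v.drop k) := by
        rw [cureOut.eq_def, if_pos hk, hd, cureL]
        simp only [hget]
        exact (ih v (k + 1) (by omega)).2 v[k].1 v[k].2
      refine ⟨hOut, fun s e => ?_⟩
      rw [cureIn.eq_def, if_pos hk, hd, mergeRun, hget]
      by_cases hc : |e - v[k].1| = 1
      · rw [if_pos hc, if_pos hc]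
        exact (ih v (k + 1) (by omega)).2 s v[k].2
      · rw [if_neg hc, if_neg hc, hOut, hd]
    · have hd : v.drop k = [] := List.drop_eq_nil_of_le (by omega)
      constructor
      · rw [cureOut.eq_def, if_neg (by omega), hd]; rw [cureL]
      · intro s e; rw [cureIn.eq_def, if_neg (by omega), hd, mergeRun]

theorem cure_fold (t : List (Int × Int)) :
    ∀ (pre : List (Int × Int)) (s e : Int),
      t.foldl cureStep (pre ++ [(s, e)]) = pre ++ mergeRun s e t := by
  induction t with
  | nil => intro pre s e; simp [mergeRun]
  | cons c t ih =>
    obtain ⟨c1, c2⟩ := c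
    intro pre s e
    simp only [List.foldl_cons]
    have hstep : cureStep (pre ++ [(s, e)]) (c1, c2) =
        if |e - c1| = 1 then pre ++ [(s, c2)] else (pre ++ [(s, e)]) ++ [(c1, c2)] := by
      simp [cureStep]
    rw [hstep]
    by_cases hc : |e - c1| = 1
    · rw [if_pos hc, ih pre s c2]
      simp only [mergeRun]
      rw [if_pos hc]
    · rw [if_neg hc, ih (pre ++ [(s, e)]) c1 c2]
      simp only [mergeRun]
      rw [if_neg hc]
      simp [cureL]

theorem cureA_eq_cureL (l : List (Int × Int)) : cureA l = cureL l := by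
  cases l with
  | nil => simp [cureA, cureL]
  | cons h t =>
    obtain ⟨h1, h2⟩ := h
    have := cure_fold t [] h1 h2
    simpa [cureA, cureL] using this

-- break of w between positions k-1 and k
def brkAt (w : List (Int × Int)) (k : Nat) : Bool :=
  decide (¬ |(w.getD (k - 1) (0, 0)).2 - (w.getD k (0, 0)).1| = 1)

-- maximal runs of w, as index intervals [a, stop)
def runsFrom (w : List (Int × Int)) (a k : Nat) : List (Nat × Nat) :=
  if k < w.length then
    (if brkAt w k then (a, k) :: runsFrom w k (k + 1) else runsFrom w a (k + 1))
  else [(a, w.length)]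
termination_by w.length - k

theorem cureIn_runs (w : List (Int × Int)) : ∀ (m k a : Nat), w.length - k ≤ m → a < k → k ≤ w.length →
    cureIn w ((w.getD a (0, 0)).1) ((w.getD (k - 1) (0, 0)).2) k
      = (runsFrom w a k).map (fun p => ((w.getD p.1 (0, 0)).1, (w.getD (p.2 - 1) (0, 0)).2)) := by
  intro m
  induction m with
  | zero =>
    intro k a hm hak hkn
    have hk : k = w.length := by omega
    rw [cureIn.eq_def, if_neg (by omega), runsFrom, if_neg (by omega)]
    simp [hk]
  | succ m ih =>
    intro k a hm hak hkn
    by_cases hk : k < w.length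
    · rw [cureIn.eq_def, if_pos hk, runsFrom, if_pos hk]
      by_cases hb : brkAt w k
      · have hc : ¬ |(w.getD (k - 1) (0, 0)).2 - (w.getD k (0, 0)).1| = 1 := by
          simpa [brkAt] using hb
        rw [if_neg hc, if_pos hb]
        rw [cureOut.eq_def, if_pos hk]
        simp only [List.map_cons]
        have := ih (k + 1) k (by omega) (by omega) (by omega)
        simp only [Nat.add_sub_cancel] at this
        rw [this]
      · have hc : |(w.getD (k - 1) (0, 0)).2 - (w.getD k (0, 0)).1| = 1 := by
          simpa [brkAt] using hb
        rw [if_pos hc, if_neg hb]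
        have := ih (k + 1) a (by omega) (by omega) (by omega)
        simp only [Nat.add_sub_cancel] at this
        rw [this]
    · have hk' : k = w.length := by omega
      rw [cureIn.eq_def, if_neg (by omega), runsFrom, if_neg (by omega)]
      simp [hk']

theorem runsFrom_bounds (w : List (Int × Int)) : ∀ (m k a : Nat), w.length - k ≤ m → k ≤ w.length →
    runsFrom w a k =
      (a :: ((List.range' k (w.length - k)).filter (brkAt w) ++ [w.length])).zip
        ((List.range' k (w.length - k)).filter (brkAt w) ++ [w.length]) := by
  intro m
  induction m with
  | zero =>
    intro k a hm hkn
    have hk : w.length - k = 0 := by omega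
    rw [runsFrom, if_neg (by omega), hk]
    simp
  | succ m ih =>
    intro k a hm hkn
    by_cases hk : k < w.length
    · rw [runsFrom, if_pos hk]
      have hr : w.length - k = (w.length - (k + 1)) + 1 := by omega
      rw [hr, List.range'_succ]
      by_cases hb : brkAt w k
      · rw [if_pos hb, ih (k + 1) k (by omega) (by omega)]
        simp [hb, List.zip]
      · rw [if_neg hb, ih (k + 1) a (by omega) (by omega)]
        simp [hb]
    · have hk0 : w.length - k = 0 := by omega
      rw [runsFrom, if_neg (by omega), hk0]
      simp

theorem cureA_runs (w : List (Int × Int)) (hw : w ≠ []) :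
    cureA w =
      ((0 :: ((List.range' 1 (w.length - 1)).filter (brkAt w) ++ [w.length])).zip
          ((List.range' 1 (w.length - 1)).filter (brkAt w) ++ [w.length])).map
        (fun p => ((w.getD p.1 (0, 0)).1, (w.getD (p.2 - 1) (0, 0)).2)) := by
  have hn : 0 < w.length := List.length_pos_of_ne_nil hw
  have h1 : cureA w = cureOut w 0 := by
    rw [cureA_eq_cureL, (cure_both w.length w 0 (by omega)).1]
    simp
  rw [h1, cureOut.eq_def, if_pos hn]
  have := cureIn_runs w w.length 1 0 (by omega) (by omega) (by omega)
  simp only [Nat.sub_self] at this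
  rw [this, runsFrom_bounds w w.length 1 0 (by omega) (by omega)]

-- normal form of the twisted list: position k reads v at the reflected index inside [i, j)
def twf (v : List (Int × Int)) (i' j' k : Nat) : Int × Int :=
  if i' ≤ k ∧ k < j' then ((v.getD (i' + j' - 1 - k) (0, 0)).2, (v.getD (i' + j' - 1 - k) (0, 0)).1)
  else v.getD k (0, 0)

theorem twistA_eq_map (v : List (Int × Int)) (i' j' : Nat) (hij : i' ≤ j') (hjn : j' ≤ v.length) :
    twistA v (i' : Int) (j' : Int) = (List.range v.length).map (twf v i' j') := by
  unfold twistA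
  rw [PySem.List.slice_to_natCast, PySem.List.slice_natCast, PySem.List.slice_from_natCast]
  apply List.ext_getElem
  · simp; omega
  · intro k hk1 hk2
    simp only [List.getElem_map, List.getElem_range, List.length_map, List.length_range] at hk2 ⊢
    have hlt : (v.take i').length = i' := by simp; omega
    have hlen2 : (v.take i' ++ (((v.drop i').take (j' - i')).map (fun p => (p.2, p.1))).reverse).length = j' := by
      simp; omega
    rw [List.getElem_append]
    split
    · rename_i h1
      rw [hlen2] at h1
      rw [List.getElem_append]
      split
      · rename_i h2
        rw [hlt] at h2
        rw [List.getElem_take]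
        simp only [twf]
        rw [if_neg (by omega), List.getD_eq_getElem v (0, 0) (by omega)]
      · rename_i h2
        rw [hlt] at h2
        rw [List.getElem_reverse, List.getElem_map, List.getElem_take, List.getElem_drop]
        simp only [twf]
        rw [if_pos (by omega), List.getD_eq_getElem v (0, 0) (by omega)]
        have hidx : i' + ((((v.drop i').take (j' - i')).map (fun p => (p.2, p.1))).length - 1 -
            (k - (v.take i').length)) = i' + j' - 1 - k := by
          simp only [List.length_map, List.length_take, List.length_drop, hlt]
          omega
        simp only [hidx]
    · rename_i h1
      rw [hlen2] at h1
      rw [List.getElem_drop]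
      simp only [twf]
      rw [if_neg (by omega), List.getD_eq_getElem v (0, 0) (by omega)]
      have hidx : j' + (k - (v.take i' ++ (((v.drop i').take (j' - i')).map
          (fun p => (p.2, p.1))).reverse).length) = k := by
        rw [hlen2]; omega
      simp only [hidx]

theorem wgetD (v : List (Int × Int)) (i' j' k : Nat) :
    (((List.range v.length).map (twf v i' j')).getD k (0, 0)) =
      if k < v.length then twf v i' j' k else (0, 0) := by
  by_cases hk : k < v.length
  · rw [if_pos hk, PySem.List.getD_map_range _ _ _ _ hk]
  · rw [if_neg hk, List.getD_eq_default]
    simp; omega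

theorem firstB_eq (v : List (Int × Int)) (i j m : Int)
    (h0 : 0 ≤ i) (hij : i ≤ j) (hjn : j ≤ (v.length : Int)) (hm0 : 0 ≤ m) (hmn : m ≤ (v.length : Int)) :
    firstB v i j m = ((twistA v i j).getD m.toNat (0, 0)).1 := by
  have hi : ((i.toNat : Nat) : Int) = i := Int.toNat_of_nonneg h0
  have hj : ((j.toNat : Nat) : Int) = j := Int.toNat_of_nonneg (by omega)
  rw [← hi, ← hj, twistA_eq_map v i.toNat j.toNat (by omega) (by omega), wgetD]
  unfold firstB twf
  by_cases hc : i ≤ m ∧ m < j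
  · rw [if_pos (by omega), if_pos (by omega), if_pos (by omega)]
    rw [PySem.List.pyGetD_of_nonneg v (0, 0) (by omega)]
    have : (i + j - 1 - m).toNat = i.toNat + j.toNat - 1 - m.toNat := by omega
    rw [hi, hj, this]
  · rw [if_neg (by omega), PySem.List.pyGetD_of_nonneg v (0, 0) hm0]
    by_cases hm : m.toNat < v.length
    · rw [if_pos hm, if_neg (by omega)]
    · rw [if_neg hm, List.getD_eq_default _ _ (by omega)]

theorem secondB_eq (v : List (Int × Int)) (i j m : Int)
    (h0 : 0 ≤ i) (hij : i ≤ j) (hjn : j ≤ (v.length : Int)) (hm0 : 0 ≤ m) (hmn : m ≤ (v.length : Int)) :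
    secondB v i j m = ((twistA v i j).getD m.toNat (0, 0)).2 := by
  have hi : ((i.toNat : Nat) : Int) = i := Int.toNat_of_nonneg h0
  have hj : ((j.toNat : Nat) : Int) = j := Int.toNat_of_nonneg (by omega)
  rw [← hi, ← hj, twistA_eq_map v i.toNat j.toNat (by omega) (by omega), wgetD]
  unfold secondB twf
  by_cases hc : i ≤ m ∧ m < j
  · rw [if_pos (by omega), if_pos (by omega), if_pos (by omega)]
    rw [PySem.List.pyGetD_of_nonneg v (0, 0) (by omega)]
    have : (i + j - 1 - m).toNat = i.toNat + j.toNat - 1 - m.toNat := by omega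
    rw [hi, hj, this]
  · rw [if_neg (by omega), PySem.List.pyGetD_of_nonneg v (0, 0) hm0]
    by_cases hm : m.toNat < v.length
    · rw [if_pos hm, if_neg (by omega)]
    · rw [if_neg hm, List.getD_eq_default _ _ (by omega)]

theorem brkTab_get (v : List (Int × Int)) (m : Int) (h0 : 0 ≤ m) (h1 : m < (v.length : Int) - 1) :
    PySem.List.pyGetD (brkTab v) m false = brkAt v (m.toNat + 1) := by
  have hm : ((m.toNat : Nat) : Int) = m := Int.toNat_of_nonneg h0
  unfold brkTab
  rw [← hm, PySem.List.pyGetD_map_pyRange_one _ 1 _ m.toNat false (by omega)]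
  unfold brkAt
  have e1 : (1 + (m.toNat : Int) - 1) = ((m.toNat : Nat) : Int) := by omega
  have e2 : (1 + (m.toNat : Int)) = ((m.toNat + 1 : Nat) : Int) := by push_cast; omega
  rw [e1, e2, PySem.List.pyGetD_natCast, PySem.List.pyGetD_natCast]
  simp only [Int.toNat_natCast, Nat.add_sub_cancel]

theorem brkAt_twist (v : List (Int × Int)) (i j : Int) (k : Nat)
    (h0 : 0 ≤ i) (hij : i < j) (hjn : j ≤ (v.length : Int)) (hk1 : 1 ≤ k) (hkn : k < v.length) :
    brkAt (twistA v i j) k =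
      (if (k : Int) = i ∨ (k : Int) = j then brkAt (twistA v i j) k
       else if i < (k : Int) ∧ (k : Int) < j then brkAt v (i.toNat + j.toNat - k)
       else brkAt v k) := by
  by_cases hs : (k : Int) = i ∨ (k : Int) = j
  · rw [if_pos hs]
  · rw [if_neg hs]
    have hi : ((i.toNat : Nat) : Int) = i := Int.toNat_of_nonneg h0
    have hj : ((j.toNat : Nat) : Int) = j := Int.toNat_of_nonneg (by omega)
    have htw : twistA v i j = (List.range v.length).map (twf v i.toNat j.toNat) := by
      conv_lhs => rw [← hi, ← hj]
      exact twistA_eq_map v i.toNat j.toNat (by omega) (by omega)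
    rw [htw]
    unfold brkAt
    rw [wgetD, wgetD, if_pos (by omega), if_pos (by omega)]
    by_cases hc : i < (k : Int) ∧ (k : Int) < j
    · rw [if_pos hc]
      unfold twf
      rw [if_pos (by omega), if_pos (by omega)]
      have e1 : i.toNat + j.toNat - 1 - (k - 1) = i.toNat + j.toNat - k := by omega
      have e2 : i.toNat + j.toNat - 1 - k = i.toNat + j.toNat - k - 1 := by omega
      rw [e1, e2, abs_sub_comm]
    · rw [if_neg hc]
      unfold twf
      rw [if_neg (show ¬ (i.toNat ≤ k - 1 ∧ k - 1 < j.toNat) by omega),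
        if_neg (show ¬ (i.toNat ≤ k ∧ k < j.toNat) by omega)]

theorem cutB_eq (v : List (Int × Int)) (i j : Int) (k : Nat)
    (h0 : 0 ≤ i) (hij : i < j) (hjn : j ≤ (v.length : Int)) (hk1 : 1 ≤ k) (hkn : k < v.length) :
    cutB v (brkTab v) i j (k : Int) = brkAt (twistA v i j) k := by
  rw [brkAt_twist v i j k h0 hij hjn hk1 hkn]
  unfold cutB
  by_cases hs : (k : Int) = i ∨ (k : Int) = j
  · rw [if_pos hs, if_pos hs]
    rw [secondB_eq v i j ((k : Int) - 1) h0 (by omega) hjn (by omega) (by omega)]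
    rw [firstB_eq v i j (k : Int) h0 (by omega) hjn (by omega) (by omega)]
    have e1 : ((k : Int) - 1).toNat = k - 1 := by omega
    have e2 : ((k : Int)).toNat = k := by omega
    rw [e1, e2]
    simp [brkAt]
  · rw [if_neg hs, if_neg hs]
    by_cases hc : i < (k : Int) ∧ (k : Int) < j
    · rw [if_pos hc, if_pos hc]
      rw [brkTab_get v (i + j - (k : Int) - 1) (by omega) (by omega)]
      congr 1
      omega
    · rw [if_neg hc, if_neg hc]
      rw [brkTab_get v ((k : Int) - 1) (by omega) (by omega)]
      congr 1
      omega

theorem pyRange_one_eq_map_range' (n : Nat) (h : 1 ≤ n) :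
    PySem.List.pyRange 1 (n : Int) 1 = (List.range' 1 (n - 1)).map (fun (k : Nat) => (k : Int)) := by
  rw [PySem.List.pyRange_one, List.range'_eq_map_range, List.map_map]
  have : ((n : Int) - 1).toNat = n - 1 := by omega
  rw [this]
  apply List.map_congr_left
  intro x _
  simp

theorem cure_twist (v : List (Int × Int)) (i j : Int)
    (h0 : 0 ≤ i) (hij : i < j) (hjn : j ≤ (v.length : Int)) :
    cureA (twistA v i j) =
      ((0 :: ((PySem.List.pyRange 1 (v.length : Int) 1).filter (cutB v (brkTab v) i j) ++ [(v.length : Int)])).zip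
          ((PySem.List.pyRange 1 (v.length : Int) 1).filter (cutB v (brkTab v) i j) ++ [(v.length : Int)])).map
        (fun ab => (firstB v i j ab.1, secondB v i j (ab.2 - 1))) := by
  have hn1 : 1 ≤ v.length := by omega
  set w := twistA v i j with hw
  have hwlen : w.length = v.length := by
    have hi : ((i.toNat : Nat) : Int) = i := Int.toNat_of_nonneg h0
    have hj : ((j.toNat : Nat) : Int) = j := Int.toNat_of_nonneg (by omega)
    rw [hw, ← hi, ← hj, twistA_eq_map v i.toNat j.toNat (by omega) (by omega)]
    simp
  have hwne : w ≠ [] := by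
    intro hnil
    rw [hnil] at hwlen
    simp at hwlen
    omega
  -- the cuts list of B is the Nat cuts list of A, cast to Int
  have hcuts : (PySem.List.pyRange 1 (v.length : Int) 1).filter (cutB v (brkTab v) i j) =
      ((List.range' 1 (v.length - 1)).filter (brkAt w)).map (fun (k : Nat) => (k : Int)) := by
    rw [pyRange_one_eq_map_range' v.length hn1, List.filter_map]
    congr 1
    apply List.filter_congr
    intro x hx
    obtain ⟨t, ht, hxe⟩ := List.mem_range'.mp hx
    exact cutB_eq v i j x h0 hij hjn (by omega) (by omega)
  rw [hcuts, cureA_runs w hwne, hwlen]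
  -- both sides are maps over the same Nat zip, one through the Int cast
  have hbl : (0 :: (((List.range' 1 (v.length - 1)).filter (brkAt w)).map (fun (k : Nat) => (k : Int)) ++
        [(v.length : Int)])) =
      (0 :: ((List.range' 1 (v.length - 1)).filter (brkAt w) ++ [v.length])).map (fun (k : Nat) => (k : Int)) := by
    simp
  have hbl2 : (((List.range' 1 (v.length - 1)).filter (brkAt w)).map (fun (k : Nat) => (k : Int)) ++
        [(v.length : Int)]) =
      ((List.range' 1 (v.length - 1)).filter (brkAt w) ++ [v.length]).map (fun (k : Nat) => (k : Int)) := by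
    simp
  rw [hbl, hbl2, List.zip_map, List.map_map]
  apply List.map_congr_left
  rintro ⟨a, b⟩ hmem
  obtain ⟨ha, hb⟩ := List.of_mem_zip hmem
  have hale : a ≤ v.length := by
    rcases List.mem_cons.mp ha with h | h
    · omega
    · rcases List.mem_append.mp h with h | h
      · obtain ⟨t, ht, he⟩ := List.mem_range'.mp (List.mem_of_mem_filter h)
        omega
      · simp at h; omega
  have hb1 : 1 ≤ b ∧ b ≤ v.length := by
    rcases List.mem_append.mp hb with h | h
    · obtain ⟨t, ht, he⟩ := List.mem_range'.mp (List.mem_of_mem_filter h)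
      omega
    · simp at h; omega
  simp only [Function.comp, Prod.map]
  rw [firstB_eq v i j (a : Int) h0 (by omega) hjn (by omega) (by omega)]
  rw [secondB_eq v i j ((b : Int) - 1) h0 (by omega) hjn (by omega) (by omega)]
  have e1 : ((a : Int)).toNat = a := by omega
  have e2 : ((b : Int) - 1).toNat = b - 1 := by omega
  rw [e1, e2, ← hw]

theorem prefixTab_eq (v : List (Int × Int)) :
    prefixTab v = (List.range (v.length + 1)).map (fun k => sumW (v.take k)) := by
  induction v using List.reverseRecOn with
  | nil => simp [prefixTab, sumW]
  | append_singleton v p ih =>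
    have hstep : prefixTab (v ++ [p]) =
        prefixTab v ++ [PySem.List.pyGetD (prefixTab v) (-1) 0 + (|p.2 - p.1| + 1)] := by
      simp [prefixTab, List.foldl_append]
    rw [hstep, ih]
    have hlast : PySem.List.pyGetD
        ((List.range (v.length + 1)).map (fun k => sumW (v.take k))) (-1) 0 = sumW v := by
      rw [List.range_succ, List.map_append]
      simp [PySem.List.pyGetD_neg_one_append_singleton]
    rw [hlast]
    have hlen : (v ++ [p]).length = v.length + 1 := by simp
    rw [hlen, List.range_succ (n := v.length + 1), List.map_append]
    congr 1
    · apply List.map_congr_left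
      intro k hk
      have hk' : k ≤ v.length := by
        have := List.mem_range.mp hk; omega
      rw [List.take_append_of_le_length hk']
    · simp only [List.map_cons, List.map_nil]
      congr 1
      have : (v ++ [p]).take (v.length + 1) = v ++ [p] := by
        apply List.take_of_length_le; simp
      rw [this]
      simp [sumW]

theorem prefixTab_get (v : List (Int × Int)) (i : Int) (h0 : 0 ≤ i)
    (hi : i ≤ (v.length : Int)) :
    PySem.List.pyGetD (prefixTab v) i 0 = sumW (v.take i.toNat) := by
  have hlen : ((prefixTab v).length : Int) = (v.length : Int) + 1 := by
    rw [prefixTab_eq]; simp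
  rw [PySem.List.pyGetD_eq_getElem (prefixTab v) 0 h0 (by omega)]
  rw [List.getElem_eq_iff]
  rw [prefixTab_eq, List.getElem?_map, List.getElem?_range (by omega)]
  rfl

theorem sum_split (v : List (Int × Int)) (i j : Nat) (hij : i ≤ j) :
    sumW (v.take i) + sumW ((v.drop i).take (j - i)) = sumW (v.take j) := by
  have : v.take j = v.take i ++ (v.drop i).take (j - i) := by
    rw [← List.take_add]
    congr 1
    omega
  rw [this]
  simp [sumW]

theorem go_eq (v : List (Int × Int)) : go v = go_alt v := by
  simp only [go, go_alt]
  congr 1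
  congr 1
  apply foldl_congr' _ (fun acc i hi => ?_)
  obtain ⟨hi0, hin⟩ := PySem.List.mem_pyRange_one.mp hi
  apply foldl_congr' _ (fun acc2 j hj => ?_)
  obtain ⟨hij, hjn⟩ := PySem.List.mem_pyRange_one.mp hj
  have hj0 : (0 : Int) ≤ j := by omega
  have hjn' : j ≤ (v.length : Int) := by omega
  have hsa : PySem.List.slice v none (some i) = v.take i.toNat := PySem.List.slice_to v hi0
  have hsb : PySem.List.slice v (some i) (some j) = (v.drop i.toNat).take (j.toNat - i.toNat) :=
    PySem.List.slice_toNat v hi0 hj0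
  rw [cure_twist v i j hi0 (by omega) hjn', hsa, hsb, prefixTab_get v i hi0 (by omega),
    prefixTab_get v j hj0 hjn', ← sum_split v i.toNat j.toNat (by omega)]
  simp only [sumW]
  rw [show ∀ X Y : Int, 1 + X + Y - 1 = X + Y from fun X Y => by ring]
  rfl

-- ===== VERDICT =====
theorem go_spec : Claim_equal_go := by
  intro v _hd
  unfold Spec_go
  exact go_eq v
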